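-- pv_equiv track=rewrite | github.com/kayats111/NLPatient | Server/Users/API.py | validateRequestSchema
-- ===== SOURCE A (Python) =====
-- from typing import Set
--
-- def validateRequestSchema(request: dict, schema: Set[str]) -> bool:
--     for field in schema:
--         if field not in request:
--             return False
--     for key in request:
--         if key not in schema:
--             return False
--     return True
-- ===== SOURCE B (Python) =====
-- def validateRequestSchema(request: dict, schema) -> bool:
--     # Canonical-form comparison: sort the two key sets and walk them in lockstep.
--     a = sorted(set(request))
--     b = sorted(set(schema))
--     if len(a) != len(b):
--         return False
--     for x, y in zip(a, b):
--         if x != y: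
--             return False
--     return True
-- ===== Notes on version B (the rewrite author's own statement) =====
-- stated objective: alternative
-- what changed: Instead of A's two directional hash-membership loops, B builds sorted canonical forms of the two key sets (comparison-based, no membership tests) and compares them in a single lockstep scan with a length pre-check.
import Mathlib
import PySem

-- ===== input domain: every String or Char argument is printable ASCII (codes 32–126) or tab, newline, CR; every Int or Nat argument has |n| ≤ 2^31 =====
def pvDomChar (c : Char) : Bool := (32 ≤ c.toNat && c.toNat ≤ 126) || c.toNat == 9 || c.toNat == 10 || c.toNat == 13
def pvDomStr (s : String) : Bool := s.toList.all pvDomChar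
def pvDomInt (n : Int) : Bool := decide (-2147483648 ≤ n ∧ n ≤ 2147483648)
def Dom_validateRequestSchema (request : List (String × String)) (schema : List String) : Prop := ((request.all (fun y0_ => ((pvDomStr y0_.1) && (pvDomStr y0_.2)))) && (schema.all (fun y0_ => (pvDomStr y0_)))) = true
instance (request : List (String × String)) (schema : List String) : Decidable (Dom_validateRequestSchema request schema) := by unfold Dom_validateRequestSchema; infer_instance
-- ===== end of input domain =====

-- B replaces A's two directional membership loops by sorted canonical forms of the two key
-- sets compared in one lockstep scan (alternative decomposition, comparison-based).

-- ===== PORT A =====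
-- loop 1: every schema field is a key of request; loop 2: every request key is in schema
-- (the early 'return False' in each loop is exactly the short-circuiting .all / &&)
def validateRequestSchema (request : List (String × String)) (schema : List String) : Bool :=
  (schema.all (fun field => request.any (fun kv => kv.1 == field))) &&
  (request.all (fun kv => schema.contains kv.1))

-- ===== PORT B =====
-- the 'for x, y in zip(a, b): if x != y: return False' scan
def pvLockstep : List (String × String) → Bool
  | [] => true
  | (x, y) :: t => if x ≠ y then false else pvLockstep t

-- a = sorted(set(request)); b = sorted(set(schema)); length pre-check; lockstep scan
def validateRequestSchema_alt (request : List (String × String)) (schema : List String) : Bool :=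
  let a := PySem.List.sorted (PySem.Set.ofList (request.map Prod.fst)) (fun x => x) false
  let b := PySem.List.sorted (PySem.Set.ofList schema) (fun x => x) false
  if a.length ≠ b.length then false else pvLockstep (a.zip b)

-- ===== PRECONDITION & SPEC =====
def Spec_validateRequestSchema (request : List (String × String)) (schema : List String) (out : Bool) : Prop := out = validateRequestSchema_alt request schema
instance (request : List (String × String)) (schema : List String) (out : Bool) : Decidable (Spec_validateRequestSchema request schema out) := by unfold Spec_validateRequestSchema; infer_instance

-- ===== CLAIM (what is proved, stated in full; the proofs are below) =====
def Claim_equal_validateRequestSchema : Prop := ∀ (request : List (String × String)) (schema : List String), Dom_validateRequestSchema request schema → Spec_validateRequestSchema request schema (validateRequestSchema request schema)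

-- ===== LEMMAS AND PROOFS =====

-- the lockstep scan over a zip of equal-length lists decides list equality
theorem pvLockstep_zip_eq (a b : List String) (h : a.length = b.length) :
    pvLockstep (a.zip b) = true ↔ a = b := by
  induction a generalizing b with
  | nil => cases b with
    | nil => simp [pvLockstep]
    | cons y t => simp at h
  | cons x s ih => cases b with
    | nil => simp at h
    | cons y t =>
      simp only [List.zip_cons_cons, pvLockstep]
      by_cases hxy : x = y
      · subst hxy
        simp only [ne_eq, not_true_eq_false, if_false]
        rw [ih t (by simpa using h)]
        simp
      · simp [hxy]

-- B computes set equality of the key sets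
theorem alt_iff (request : List (String × String)) (schema : List String) :
    validateRequestSchema_alt request schema = true ↔
      (∀ x : String, x ∈ request.map Prod.fst ↔ x ∈ schema) := by
  unfold validateRequestSchema_alt
  by_cases hlen :
      (PySem.List.sorted (PySem.Set.ofList (request.map Prod.fst)) (fun x => x) false).length =
      (PySem.List.sorted (PySem.Set.ofList schema) (fun x => x) false).length
  · simp only [hlen, ne_eq, not_true_eq_false, if_false,
      pvLockstep_zip_eq _ _ hlen,
      PySem.List.sorted_id_eq_sorted_id_iff_perm]
    rw [List.perm_ext_iff_of_nodup (PySem.Set.nodup_ofList _) (PySem.Set.nodup_ofList _)]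
    simp [PySem.Set.mem_ofList]
  · simp only [ne_eq, hlen, not_false_eq_true, if_true]
    constructor
    · intro hfalse; cases hfalse
    intro hmem
    exfalso
    apply hlen
    rw [PySem.List.length_sorted, PySem.List.length_sorted]
    exact List.Perm.length_eq
      ((List.perm_ext_iff_of_nodup (PySem.Set.nodup_ofList _) (PySem.Set.nodup_ofList _)).mpr
        (by simpa [PySem.Set.mem_ofList] using hmem))

-- ===== VERDICT (by name: the statement is the Claim_ definition above) =====
theorem validateRequestSchema_spec : Claim_equal_validateRequestSchema := by
  intro request schema _
  show validateRequestSchema request schema = validateRequestSchema_alt request schema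
  rw [Bool.eq_iff_iff, alt_iff]
  simp only [validateRequestSchema, Bool.and_eq_true, List.all_eq_true, List.any_eq_true,
    beq_iff_eq, List.contains_eq_mem, decide_eq_true_eq]
  constructor
  · rintro ⟨h1, h2⟩ x
    constructor
    · rintro hx
      obtain ⟨kv, hkv, rfl⟩ := List.mem_map.mp hx
      exact h2 kv hkv
    · intro hx
      obtain ⟨kv, hkv, hk⟩ := h1 x hx
      exact List.mem_map.mpr ⟨kv, hkv, hk⟩
  · intro h
    refine ⟨fun f hf => ?_, fun kv hkv => ?_⟩
    · obtain ⟨kv, hkv, hk⟩ := List.mem_map.mp ((h f).mpr hf)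
      exact ⟨kv, hkv, hk⟩
    · exact (h kv.1).mp (List.mem_map.mpr ⟨kv, hkv, rfl⟩)
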